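-- pv_equiv track=rewrite | github.com/MateusAlcantara13/python-temperature-analysis | main.py | contar_acima_abaixo_igual
-- ===== SOURCE A (Python) =====
-- def contar_acima_abaixo_igual(lista, media):
--     """
--     Conta quantas temperaturas estão:
--     - acima da média
--     - abaixo da média
--     - iguais à média
--     """
--     acima = 0
--     abaixo = 0
--     igual = 0
--
--     for temp in lista:
--         if temp > media:
--             acima += 1
--         elif temp < media:
--             abaixo += 1
--         else:
--             igual += 1
--
--     return acima, abaixo, igual
-- ===== SOURCE B (Python) =====
-- def contar_acima_abaixo_igual(lista, media):
--     acima = sum(1 for t in lista if t > media)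
--     abaixo = sum(1 for t in lista if t < media)
--     igual = len(lista) - acima - abaixo
--     return acima, abaixo, igual
-- ===== Notes on version B (the rewrite author's own statement) =====
-- stated objective: simpler
-- what changed: Replaces the single three-way branching accumulator loop by two filtered counts (sum of 1 over t > media and t < media) and derives igual arithmetically as len(lista) - acima - abaixo.
import Mathlib
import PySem

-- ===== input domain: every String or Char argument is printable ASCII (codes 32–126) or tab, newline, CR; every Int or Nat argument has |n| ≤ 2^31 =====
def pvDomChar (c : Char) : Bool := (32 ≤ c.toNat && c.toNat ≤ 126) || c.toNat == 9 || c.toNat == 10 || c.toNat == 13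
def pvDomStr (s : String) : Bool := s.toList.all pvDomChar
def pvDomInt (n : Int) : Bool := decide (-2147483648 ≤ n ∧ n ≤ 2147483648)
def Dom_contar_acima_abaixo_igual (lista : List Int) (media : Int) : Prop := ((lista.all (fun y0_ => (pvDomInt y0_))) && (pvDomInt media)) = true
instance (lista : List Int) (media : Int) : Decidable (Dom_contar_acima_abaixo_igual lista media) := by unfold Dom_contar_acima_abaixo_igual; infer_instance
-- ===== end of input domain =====

-- B replaces A's single three-way branching loop by two filtered counts and derives the 'equal' count by subtraction (objective: simpler).


-- ===== PORT A =====
def contar_acima_abaixo_igual (lista : List Int) (media : Int) : Int × Int × Int :=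
  lista.foldl (fun (acc : Int × Int × Int) temp =>
    if temp > media then (acc.1 + 1, acc.2.1, acc.2.2)
    else if temp < media then (acc.1, acc.2.1 + 1, acc.2.2)
    else (acc.1, acc.2.1, acc.2.2 + 1)) (0, 0, 0)

-- ===== PORT B =====
def contar_acima_abaixo_igual_alt (lista : List Int) (media : Int) : Int × Int × Int :=
  let acima : Int := ((lista.filter (fun t => t > media)).map (fun _ => (1 : Int))).sum
  let abaixo : Int := ((lista.filter (fun t => t < media)).map (fun _ => (1 : Int))).sum
  let igual : Int := (lista.length : Int) - acima - abaixo
  (acima, abaixo, igual)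

-- ===== PRECONDITION & SPEC =====
def Spec_contar_acima_abaixo_igual (lista : List Int) (media : Int) (out : Int × Int × Int) : Prop := out = contar_acima_abaixo_igual_alt lista media
instance (lista : List Int) (media : Int) (out : Int × Int × Int) : Decidable (Spec_contar_acima_abaixo_igual lista media out) := by unfold Spec_contar_acima_abaixo_igual; infer_instance

-- ===== CLAIM (what is proved, stated in full; the proofs are below) =====
def Claim_equal_contar_acima_abaixo_igual : Prop := ∀ (lista : List Int) (media : Int), Dom_contar_acima_abaixo_igual lista media → Spec_contar_acima_abaixo_igual lista media (contar_acima_abaixo_igual lista media)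

-- ===== LEMMAS AND PROOFS =====

-- ===== VERDICT (by name: the statement is the Claim_ definition above) =====
lemma pv_foldl_shift (lista : List Int) (media : Int) (a b c : Int) :
    lista.foldl (fun (acc : Int × Int × Int) temp =>
      if temp > media then (acc.1 + 1, acc.2.1, acc.2.2)
      else if temp < media then (acc.1, acc.2.1 + 1, acc.2.2)
      else (acc.1, acc.2.1, acc.2.2 + 1)) (a, b, c)
    = (a + (contar_acima_abaixo_igual lista media).1,
       b + (contar_acima_abaixo_igual lista media).2.1,
       c + (contar_acima_abaixo_igual lista media).2.2) := by
  induction lista generalizing a b c with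
  | nil => simp [contar_acima_abaixo_igual]
  | cons x xs ih =>
    simp only [contar_acima_abaixo_igual, List.foldl_cons]
    split_ifs with h1 h2 <;>
      simp only [ih, Prod.mk.injEq] <;> refine ⟨by ring, by ring, by ring⟩

-- ===== VERDICT (by name: the statement is the Claim_ definition above) =====
lemma pv_main_eq (lista : List Int) (media : Int) :
    contar_acima_abaixo_igual lista media = contar_acima_abaixo_igual_alt lista media := by
  induction lista with
  | nil => simp [contar_acima_abaixo_igual, contar_acima_abaixo_igual_alt]
  | cons x xs ih =>
    simp only [contar_acima_abaixo_igual, List.foldl_cons]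
    simp only [contar_acima_abaixo_igual_alt, List.filter_cons, List.length_cons]
    split_ifs <;> simp only [decide_eq_true_eq] at * <;>
      first
      | omega
      | (rw [pv_foldl_shift, ih]
         simp only [contar_acima_abaixo_igual_alt, List.map_cons, List.sum_cons, Prod.mk.injEq]
         push_cast
         refine ⟨by ring, by ring, by ring⟩)

-- the verdict
theorem contar_acima_abaixo_igual_spec : Claim_equal_contar_acima_abaixo_igual := by
  intro lista media _
  unfold Spec_contar_acima_abaixo_igual
  exact pv_main_eq lista media
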